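-- pv_equiv track=rewrite | github.com/ZicsX/CP-Solutions | A_Second_Hands.py | solve
-- ===== SOURCE A (Python) =====
-- def solve(N, K, parts):
--     if N > 2 * K:
--         return False
--     h = {}
--     for p in parts:
--         if p in h:
--             if h[p] == 2:
--                 return False
--             else:
--                 h[p] += 1
--         else:
--             h[p] = 1
--     return True
-- ===== SOURCE B (Python) =====
-- def solve(N, K, parts):
--     if N > 2 * K:
--         return False
--     s = sorted(parts)
--     return all(a != c for a, c in zip(s, s[2:]))
-- ===== Notes on version B (the rewrite author's own statement) =====
-- stated objective: alternative
-- what changed: Replaced the early-exit hash-map counting loop with a sort-then-scan: sort a copy of parts and check that no element equals the one two positions later (i.e. no value occurs three times).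
import Mathlib
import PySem

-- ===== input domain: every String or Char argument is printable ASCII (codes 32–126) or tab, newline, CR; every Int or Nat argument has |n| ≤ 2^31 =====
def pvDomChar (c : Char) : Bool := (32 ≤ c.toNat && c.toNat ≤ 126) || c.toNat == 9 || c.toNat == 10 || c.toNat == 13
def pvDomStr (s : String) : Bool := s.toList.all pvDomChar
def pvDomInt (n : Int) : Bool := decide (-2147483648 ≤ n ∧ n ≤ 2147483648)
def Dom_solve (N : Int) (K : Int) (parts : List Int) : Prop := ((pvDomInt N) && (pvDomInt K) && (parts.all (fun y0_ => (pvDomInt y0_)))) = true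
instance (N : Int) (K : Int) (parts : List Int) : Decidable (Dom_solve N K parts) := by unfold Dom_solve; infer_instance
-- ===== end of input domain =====

-- B replaces A's early-exit hash-map counting loop with a sort-then-scan (no element equals the one two positions later in the sorted copy); alternative algorithm, same return values, no mutation of parts.


-- ===== PORT A =====
-- the for-loop over parts with the dict h and its early `return False`
def solveLoopA : List Int → PySem.Dict Int Int → Bool
  | [], _ => true
  | p :: rest, h =>
    match h.get? p with
    | some v => if v == 2 then false else solveLoopA rest (h.insert p (v + 1))
    | none => solveLoopA rest (h.insert p 1)

def solve (N : Int) (K : Int) (parts : List Int) : Bool :=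
  if N > 2 * K then false
  else solveLoopA parts PySem.Dict.empty

-- ===== PORT B =====
-- all(a != c for a, c in zip(s, s[2:]))
def scanB (s : List Int) : Bool :=
  (s.zip (PySem.List.slice s (some 2) none)).all (fun p => !(p.1 == p.2))

def solve_alt (N : Int) (K : Int) (parts : List Int) : Bool :=
  if N > 2 * K then false
  else scanB (PySem.List.sorted parts (fun x => x) false)

-- ===== PRECONDITION & SPEC =====
def Spec_solve (N : Int) (K : Int) (parts : List Int) (out : Bool) : Prop := out = solve_alt N K parts
instance (N : Int) (K : Int) (parts : List Int) (out : Bool) : Decidable (Spec_solve N K parts out) := by unfold Spec_solve; infer_instance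

-- ===== CLAIM (what is proved, stated in full; the proofs are below) =====
def Claim_equal_solve : Prop := ∀ (N : Int) (K : Int) (parts : List Int), Dom_solve N K parts → Spec_solve N K parts (solve N K parts)

-- ===== LEMMAS AND PROOFS =====

-- A's loop invariant: every value stored in h is 1 or 2; then the loop succeeds
-- iff every element's stored-so-far count plus its remaining occurrences is ≤ 2.
lemma loopA_iff (l : List Int) (h : PySem.Dict Int Int)
    (inv : ∀ x v, h.get? x = some v → 1 ≤ v ∧ v ≤ 2) :
    solveLoopA l h = true ↔ ∀ x : Int, h.getD x 0 + l.count x ≤ 2 := by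
  induction l generalizing h with
  | nil =>
    simp only [solveLoopA, List.count_nil, Nat.cast_zero, add_zero, true_iff]
    intro x
    rw [PySem.Dict.getD_eq_get?_getD]
    cases hg : h.get? x with
    | none => simp
    | some v => simpa using (inv x v hg).2
  | cons p rest ih =>
    cases hg : h.get? p with
    | none =>
      have inv' : ∀ x v, (h.insert p 1).get? x = some v → 1 ≤ v ∧ v ≤ 2 := by
        intro x v hx
        rw [PySem.Dict.get?_insert] at hx
        split_ifs at hx with hxp
        · cases hx; omega
        · exact inv x v hx
      have key : ∀ x : Int, (h.insert p 1).getD x 0 + (rest.count x : Int)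
          = h.getD x 0 + ((p :: rest).count x : Int) := by
        intro x
        rw [PySem.Dict.getD_insert]
        by_cases hxp : x = p
        · subst hxp
          rw [if_pos rfl, PySem.Dict.getD_eq_get?_getD, hg, List.count_cons_self]
          simp only [Option.getD_none]
          push_cast
          ring
        · rw [if_neg hxp, List.count_cons_of_ne (Ne.symm hxp)]
      rw [solveLoopA, hg, ih _ inv']
      exact forall_congr' fun x => by rw [key x]
    | some v =>
      have hv := inv p v hg
      by_cases hv2 : v = 2
      · subst hv2
        rw [solveLoopA, hg]
        simp only [BEq.rfl, if_true, Bool.false_eq_true, false_iff]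
        intro H
        have := H p
        rw [PySem.Dict.getD_eq_get?_getD, hg, List.count_cons_self] at this
        simp only [Option.getD_some] at this
        push_cast at this
        omega
      · have hv1 : v = 1 := by omega
        subst hv1
        have inv' : ∀ x w, (h.insert p (1 + 1)).get? x = some w → 1 ≤ w ∧ w ≤ 2 := by
          intro x w hx
          rw [PySem.Dict.get?_insert] at hx
          split_ifs at hx with hxp
          · cases hx; omega
          · exact inv x w hx
        have key : ∀ x : Int, (h.insert p (1 + 1)).getD x 0 + (rest.count x : Int)
            = h.getD x 0 + ((p :: rest).count x : Int) := by
          intro x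
          rw [PySem.Dict.getD_insert]
          by_cases hxp : x = p
          · subst hxp
            rw [if_pos rfl, PySem.Dict.getD_eq_get?_getD, hg, List.count_cons_self]
            simp only [Option.getD_some]
            push_cast
            ring
          · rw [if_neg hxp, List.count_cons_of_ne (Ne.symm hxp)]
        rw [solveLoopA, hg]
        simp only [show ((1:Int) == 2) = false by decide, Bool.false_eq_true, if_false]
        rw [ih _ inv']
        exact forall_congr' fun x => by rw [key x]

lemma solve_iff (N K : Int) (parts : List Int) (h : ¬ N > 2 * K) :
    solve N K parts = true ↔ ∀ x : Int, parts.count x ≤ 2 := by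
  rw [solve, if_neg h, loopA_iff _ _ (by intro x v hx; simp [PySem.Dict.get?_empty] at hx)]
  constructor <;> intro H x <;> have := H x <;>
    simp only [PySem.Dict.getD_empty, zero_add] at * <;> omega

lemma slice2 (s : List Int) : PySem.List.slice s (some 2) none = s.drop 2 := by
  simpa using PySem.List.slice_from_natCast s 2

-- B's scan on a sorted list: no element equals the one two later iff every count ≤ 2.
lemma scan_zip_iff (s : List Int) (hs : s.Pairwise (· ≤ ·)) :
    ((s.zip (s.drop 2)).all (fun p => !(p.1 == p.2))) = true ↔ ∀ x : Int, s.count x ≤ 2 := by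
  induction s with
  | nil => simp
  | cons a t ih =>
    match t, hs with
    | [], _ =>
      simp only [List.drop, List.zip_nil_right, List.all_nil, true_iff]
      intro x
      exact le_trans List.count_le_length (by simp)
    | [b], _ =>
      simp only [List.drop, List.zip_nil_right, List.all_nil, true_iff]
      intro x
      exact le_trans List.count_le_length (by simp)
    | b :: c :: r, hs =>
      -- zip (a::b::c::r) (c::r) = (a, c) :: zip (b::c::r) r
      have hzip : ((a :: b :: c :: r).zip ((a :: b :: c :: r).drop 2))
          = (a, c) :: ((b :: c :: r).zip ((b :: c :: r).drop 2)) := by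
        simp [List.zip]
      rw [hzip]
      obtain ⟨ha, ht⟩ := List.pairwise_cons.mp hs
      obtain ⟨hb, ht2⟩ := List.pairwise_cons.mp ht
      obtain ⟨hc, _⟩ := List.pairwise_cons.mp ht2
      have hab : a ≤ b := ha b (by simp)
      have hac : a ≤ c := ha c (by simp)
      have hbc : b ≤ c := hb c (by simp)
      rw [List.all_cons, Bool.and_eq_true, ih ht]
      constructor
      · rintro ⟨hne, H⟩
        have hac' : a < c := lt_of_le_of_ne hac (by simpa using hne)
        intro x
        by_cases hxa : x = a
        · subst hxa
          have hnot : x ∉ c :: r := by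
            intro hm
            rcases List.mem_cons.mp hm with h1 | h1
            · omega
            · exact absurd (hc x h1) (by omega)
          have h0 : (c :: r).count x = 0 := List.count_eq_zero.mpr hnot
          rw [List.count_cons_self]
          by_cases hxb : x = b
          · rw [← hxb] at *
            rw [List.count_cons_self, h0]
          · rw [List.count_cons_of_ne (Ne.symm hxb), h0]
            omega
        · rw [List.count_cons_of_ne (Ne.symm hxa)]
          exact H x
      · intro H
        refine ⟨?_, fun x => ?_⟩
        · simp only [Bool.not_eq_eq_eq_not, Bool.not_true, beq_eq_false_iff_ne, ne_eq]
          intro hac'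
          have hba : b = a := le_antisymm (hac' ▸ hbc) hab
          have := H a
          simp [hba, hac'] at this
        · have h1 : (b :: c :: r).count x ≤ (a :: b :: c :: r).count x := by
            by_cases hxa : x = a
            · subst hxa; rw [List.count_cons_self]; omega
            · rw [List.count_cons_of_ne (Ne.symm hxa)]
          exact le_trans h1 (H x)

lemma scanB_iff (s : List Int) (hs : s.Pairwise (· ≤ ·)) :
    scanB s = true ↔ ∀ x : Int, s.count x ≤ 2 := by
  rw [scanB, slice2]
  exact scan_zip_iff s hs

-- ===== VERDICT (by name: the statement is the Claim_ definition above) =====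
theorem solve_spec : Claim_equal_solve := by
  intro N K parts _
  unfold Spec_solve
  by_cases hNK : N > 2 * K
  · simp [solve, solve_alt, hNK]
  · rw [Bool.eq_iff_iff, solve_iff N K parts hNK, solve_alt, if_neg hNK]
    have hperm := PySem.List.sorted_perm parts (fun x => x) false
    have hpw : (PySem.List.sorted parts (fun x => x) false).Pairwise (· ≤ ·) :=
      PySem.List.sorted_pairwise parts (fun x => x)
    rw [scanB_iff _ hpw]
    exact forall_congr' fun x => by rw [hperm.count_eq]
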